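-- pv_equiv track=rewrite | github.com/RaysonSu/adventofcode2015 | Day 18/main.py | main_part_2
-- ===== SOURCE A (Python) =====
-- OUTPUT_TYPE = int
--
-- class CellularAutomata1:
--     def __init__(self, bound: int = 100, stuck: bool = False) -> None:
--         self.points: set[tuple[int, int]] = set()
--         self.bound: int = bound
--         self.stuck: bool = stuck
--
--         if stuck:
--             self.points.add((0, 0))
--             self.points.add((0, self.bound - 1))
--             self.points.add((self.bound - 1, 0))
--             self.points.add((self.bound - 1, self.bound - 1))
--
--     def add_point(self, points: tuple[int, int] | list[tuple[int, int]]) -> None: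
--         if isinstance(points, list):
--             for point in points:
--                 self.points.add(point)
--         else:
--             self.points.add(points)
--
--     def generate_neighbours(self, point: tuple[int, int]) -> list[tuple[int, int]]:
--         neighbours: list[tuple[int, int]] = []
--         for y_diff in range(-1, 2):
--             for x_diff in range(-1, 2):
--                 if x_diff == 0 and y_diff == 0:
--                     continue
--                 neighbours.append((point[0] + x_diff, point[1] + y_diff))
--
--         return neighbours
--
--     def determine_future_point(self, point: tuple[int, int]) -> int:
--         lookup: int = 0
--         for point in self.generate_neighbours(point):
--             if point in self.points:
--                 lookup += 1
--
--         return lookup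
--
--     def in_bound(self, point: tuple[int, int]) -> int:
--         return min(point) >= 0 and max(point) < self.bound
--
--     def tick(self) -> None:
--         new_points: set[tuple[int, int]] = set()
--         for point in self.points:
--             if self.determine_future_point(point) in [2, 3]:
--                 new_points.add(point)
--
--             for neighbour in self.generate_neighbours(point):
--                 if not self.in_bound(neighbour):
--                     continue
--
--                 count: int = self.determine_future_point(neighbour)
--                 if neighbour not in self.points and count == 3:
--                     new_points.add(neighbour)
--
--         if self.stuck:
--             new_points.add((0, 0))
--             new_points.add((0, self.bound - 1))
--             new_points.add((self.bound - 1, 0))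
--             new_points.add((self.bound - 1, self.bound - 1))
--
--         self.points = new_points
--
-- def main_part_2(inp: list[str], steps: int = 100) -> OUTPUT_TYPE:
--     cell: CellularAutomata1 = CellularAutomata1(len(inp), True)
--     grid: list[tuple[int, int]] = []
--
--     for y, row in enumerate(inp):
--         for x, char in enumerate(row.strip()):
--             if char == "#":
--                 grid.append((x, y))
--
--     cell.add_point(grid)
--     for _ in range(steps):
--         cell.tick()
--
--     return len(cell.points)
-- ===== SOURCE B (Python) =====
-- from collections import Counter
--
-- OFFS = [(-1, -1), (0, -1), (1, -1), (-1, 0), (1, 0), (-1, 1), (0, 1), (1, 1)]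
--
-- def main_part_2(inp: list[str], steps: int = 100) -> int:
--     n = len(inp)
--     corners = {(0, 0), (0, n - 1), (n - 1, 0), (n - 1, n - 1)}
--     live = corners | {(x, y)
--                       for y, row in enumerate(inp)
--                       for x, ch in enumerate(row.strip()) if ch == "#"}
--     for _ in range(steps):
--         cnt = Counter((x + dx, y + dy) for (x, y) in live for (dx, dy) in OFFS)
--         live = {p for p, c in cnt.items()
--                 if ((c in (2, 3)) if p in live
--                     else (c == 3 and 0 <= p[0] < n and 0 <= p[1] < n))} | corners
--     return len(live)
-- ===== Notes on version B (the rewrite author's own statement) =====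
-- stated objective: faster
-- what changed: Instead of rescanning all 8 neighbours of every live cell and of each of its neighbours with per-cell set lookups (~64 membership tests per live cell per tick), B builds one neighbour-count Counter in a single pass over the live set and applies the survival/birth rules once per counted cell.
import Mathlib
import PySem

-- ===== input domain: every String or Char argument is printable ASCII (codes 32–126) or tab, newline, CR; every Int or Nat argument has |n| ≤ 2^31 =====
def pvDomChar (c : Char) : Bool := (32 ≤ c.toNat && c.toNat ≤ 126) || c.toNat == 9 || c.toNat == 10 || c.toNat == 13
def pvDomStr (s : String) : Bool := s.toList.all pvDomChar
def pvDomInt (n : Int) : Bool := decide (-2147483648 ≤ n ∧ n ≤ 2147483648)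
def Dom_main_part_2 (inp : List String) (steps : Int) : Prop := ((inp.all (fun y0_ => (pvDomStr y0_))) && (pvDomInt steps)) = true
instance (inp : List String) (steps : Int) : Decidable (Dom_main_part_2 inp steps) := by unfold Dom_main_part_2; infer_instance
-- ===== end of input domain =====

-- B replaces A's per-cell neighbour rescans (one 8-element membership scan per neighbour of
-- every live cell, every tick) by a single neighbour-count Counter built in one pass over the
-- live set, then applies the life rules once per counted cell; objective: faster (constant factor).

-- ===== PORT A =====
-- generate_neighbours: y_diff outer, x_diff inner over range(-1, 2), skipping (0, 0)
def pvNeighA (p : Int × Int) : List (Int × Int) :=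
  (PySem.List.pyRange (-1) 2 1).foldl (fun acc yd =>
    (PySem.List.pyRange (-1) 2 1).foldl (fun acc xd =>
      if xd = 0 ∧ yd = 0 then acc else acc ++ [(p.1 + xd, p.2 + yd)]) acc) []

-- determine_future_point
def pvDetA (pts : PySem.Set (Int × Int)) (p : Int × Int) : Int :=
  (pvNeighA p).foldl (fun c q => if PySem.Set.contains pts q then c + 1 else c) 0

-- in_bound
def pvInBoundA (bound : Int) (p : Int × Int) : Bool :=
  decide (0 ≤ min p.1 p.2) && decide (max p.1 p.2 < bound)

-- the four stuck-corner adds (this code appears verbatim in __init__ and at the end of tick)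
def pvStuckAdd (bound : Int) (s : PySem.Set (Int × Int)) : PySem.Set (Int × Int) :=
  PySem.Set.add (PySem.Set.add (PySem.Set.add (PySem.Set.add s
    (0, 0)) (0, bound - 1)) (bound - 1, 0)) (bound - 1, bound - 1)

-- tick
def pvTickA (bound : Int) (pts : PySem.Set (Int × Int)) : PySem.Set (Int × Int) :=
  let newPoints := pts.foldl (fun np p =>
    let np := if pvDetA pts p ∈ ([2, 3] : List Int) then PySem.Set.add np p else np
    (pvNeighA p).foldl (fun np nb =>
      if !(pvInBoundA bound nb) then np
      else if PySem.Set.contains pts nb = false ∧ pvDetA pts nb = 3 then PySem.Set.add np nb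
      else np) np) PySem.Set.empty
  pvStuckAdd bound newPoints

def main_part_2 (inp : List String) (steps : Int) : Int :=
  let bound : Int := (inp.length : Int)
  let pts0 := pvStuckAdd bound PySem.Set.empty
  let grid := (PySem.List.enumerate inp).foldl (fun g yr =>
    (PySem.List.enumerate (PySem.Str.strip yr.2).toList).foldl (fun g xc =>
      if xc.2 == '#' then g ++ [(xc.1, yr.1)] else g) g) ([] : List (Int × Int))
  let pts1 := PySem.Set.update pts0 grid
  let final := (PySem.List.pyRange 0 steps 1).foldl (fun s _ => pvTickA bound s) pts1
  (final.length : Int)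

-- ===== PORT B =====
def pvOffs : List (Int × Int) := [(-1, -1), (0, -1), (1, -1), (-1, 0), (1, 0), (-1, 1), (0, 1), (1, 1)]

-- one Counter pass over the live cells, then one rule application per counted cell
def pvTickB (n : Int) (corners : PySem.Set (Int × Int)) (live : PySem.Set (Int × Int)) :
    PySem.Set (Int × Int) :=
  let cnt := PySem.Dict.counter (live.flatMap (fun p => pvOffs.map (fun d => (p.1 + d.1, p.2 + d.2))))
  let kept := (cnt.items.filter (fun pc =>
      if PySem.Set.contains live pc.1 then pc.2 == 2 || pc.2 == 3
      else pc.2 == 3 && decide (0 ≤ pc.1.1) && decide (pc.1.1 < n)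
             && decide (0 ≤ pc.1.2) && decide (pc.1.2 < n))).map (·.1)
  PySem.Set.union (PySem.Set.ofList kept) corners

def main_part_2_alt (inp : List String) (steps : Int) : Int :=
  let n : Int := (inp.length : Int)
  let corners := PySem.Set.ofList [((0 : Int), (0 : Int)), (0, n - 1), (n - 1, 0), (n - 1, n - 1)]
  let grid := (PySem.List.enumerate inp).flatMap (fun yr =>
    ((PySem.List.enumerate (PySem.Str.strip yr.2).toList).filter (fun xc => xc.2 == '#')).map
      (fun xc => (xc.1, yr.1)))
  let live0 := PySem.Set.union corners (PySem.Set.ofList grid)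
  let final := (PySem.List.pyRange 0 steps 1).foldl (fun live _ => pvTickB n corners live) live0
  (final.length : Int)

-- ===== PRECONDITION & SPEC =====
def Spec_main_part_2 (inp : List String) (steps : Int) (out : Int) : Prop := out = main_part_2_alt inp steps
instance (inp : List String) (steps : Int) (out : Int) : Decidable (Spec_main_part_2 inp steps out) := by unfold Spec_main_part_2; infer_instance

-- ===== CLAIM (what is proved, stated in full; the proofs are below) =====
def Claim_equal_main_part_2 : Prop := ∀ (inp : List String) (steps : Int), Dom_main_part_2 inp steps → Spec_main_part_2 inp steps (main_part_2 inp steps)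

-- ===== LEMMAS AND PROOFS =====

lemma mem_foldl_add_if {α : Type} [BEq α] [LawfulBEq α] (P : α → Prop) [DecidablePred P]
    (l : List α) (np : PySem.Set α) (q : α) :
    q ∈ l.foldl (fun np x => if P x then PySem.Set.add np x else np) np ↔
      q ∈ np ∨ (q ∈ l ∧ P q) := by
  induction l generalizing np with
  | nil => simp
  | cons x xs ih =>
    by_cases hx : P x
    · simp only [List.foldl_cons, if_pos hx, ih, PySem.Set.mem_add, List.mem_cons]
      constructor
      · rintro ((h | rfl) | h) <;> tauto
      · rintro (h | ⟨(rfl | h), hp⟩) <;> tauto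
    · simp only [List.foldl_cons, if_neg hx, ih, List.mem_cons]
      constructor
      · rintro (h | h) <;> tauto
      · rintro (h | ⟨(rfl | h), hp⟩) <;> tauto

lemma nodup_foldl_add_if {α : Type} [BEq α] [LawfulBEq α] (P : α → Prop) [DecidablePred P]
    (l : List α) (np : PySem.Set α) (h : np.Nodup) :
    (l.foldl (fun np x => if P x then PySem.Set.add np x else np) np).Nodup := by
  induction l generalizing np with
  | nil => exact h
  | cons x xs ih =>
    simp only [List.foldl_cons]
    split_ifs <;> apply ih <;> first | exact h | exact PySem.Set.nodup_add _ _ h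

lemma inner_step_eq (bound : Int) (pts : PySem.Set (Int × Int)) :
    (fun (np : PySem.Set (Int × Int)) nb =>
        if !(pvInBoundA bound nb) then np
        else if PySem.Set.contains pts nb = false ∧ pvDetA pts nb = 3 then PySem.Set.add np nb
        else np) =
      (fun np nb =>
        if pvInBoundA bound nb = true ∧ (PySem.Set.contains pts nb = false ∧ pvDetA pts nb = 3)
        then PySem.Set.add np nb else np) := by
  funext np nb
  by_cases h1 : pvInBoundA bound nb <;>
    by_cases h2 : PySem.Set.contains pts nb = false ∧ pvDetA pts nb = 3 <;> simp [h1, h2]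

lemma mem_stuckAdd {bound : Int} {s : PySem.Set (Int × Int)} {q : Int × Int} :
    q ∈ pvStuckAdd bound s ↔ q ∈ s ∨ q = ((0 : Int), (0 : Int)) ∨ q = (0, bound - 1) ∨
      q = (bound - 1, 0) ∨ q = (bound - 1, bound - 1) := by
  simp [pvStuckAdd, PySem.Set.mem_add, or_assoc]

lemma nodup_stuckAdd (bound : Int) (s : PySem.Set (Int × Int)) (h : s.Nodup) :
    (pvStuckAdd bound s).Nodup := by
  unfold pvStuckAdd
  exact PySem.Set.nodup_add _ _ (PySem.Set.nodup_add _ _ (PySem.Set.nodup_add _ _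
    (PySem.Set.nodup_add _ _ h)))

lemma mem_outer {α : Type} [BEq α] [LawfulBEq α] (S : α → Prop) [DecidablePred S]
    (P : α → Prop) [DecidablePred P] (g : α → List α) (o : List α)
    (np : PySem.Set α) (q : α) :
    q ∈ o.foldl (fun np p =>
      let np := if S p then PySem.Set.add np p else np
      (g p).foldl (fun np nb => if P nb then PySem.Set.add np nb else np) np) np ↔
      q ∈ np ∨ ∃ p ∈ o, (q = p ∧ S p) ∨ (q ∈ g p ∧ P q) := by
  induction o generalizing np with
  | nil => simp
  | cons p o ih =>
    rw [List.foldl_cons, ih]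
    simp only [mem_foldl_add_if P]
    by_cases hs : S p
    · rw [if_pos hs]
      simp only [PySem.Set.mem_add]
      constructor
      · rintro (((h | rfl) | h) | ⟨r, hr, h⟩)
        · exact Or.inl h
        · exact Or.inr ⟨q, by simp, Or.inl ⟨rfl, hs⟩⟩
        · exact Or.inr ⟨p, by simp, Or.inr h⟩
        · exact Or.inr ⟨r, List.mem_cons_of_mem _ hr, h⟩
      · rintro (h | ⟨r, hr, h⟩)
        · exact Or.inl (Or.inl (Or.inl h))
        · rcases List.mem_cons.mp hr with rfl | hr
          · rcases h with ⟨rfl, _⟩ | h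
            · exact Or.inl (Or.inl (Or.inr rfl))
            · exact Or.inl (Or.inr h)
          · exact Or.inr ⟨r, hr, h⟩
    · rw [if_neg hs]
      constructor
      · rintro ((h | h) | ⟨r, hr, h⟩)
        · exact Or.inl h
        · exact Or.inr ⟨p, by simp, Or.inr h⟩
        · exact Or.inr ⟨r, List.mem_cons_of_mem _ hr, h⟩
      · rintro (h | ⟨r, hr, h⟩)
        · exact Or.inl (Or.inl h)
        · rcases List.mem_cons.mp hr with rfl | hr
          · rcases h with ⟨rfl, hS⟩ | h
            · exact absurd hS hs
            · exact Or.inl (Or.inr h)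
          · exact Or.inr ⟨r, hr, h⟩

lemma nodup_outer {α : Type} [BEq α] [LawfulBEq α] (S : α → Prop) [DecidablePred S]
    (P : α → Prop) [DecidablePred P] (g : α → List α) (o : List α)
    (np : PySem.Set α) (h : np.Nodup) :
    (o.foldl (fun np p =>
      let np := if S p then PySem.Set.add np p else np
      (g p).foldl (fun np nb => if P nb then PySem.Set.add np nb else np) np) np).Nodup := by
  induction o generalizing np with
  | nil => exact h
  | cons p o ih =>
    rw [List.foldl_cons]
    apply ih
    apply nodup_foldl_add_if
    split_ifs
    · exact PySem.Set.nodup_add _ _ h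
    · exact h

lemma contains_false_iff {α : Type} [BEq α] [LawfulBEq α] (s : PySem.Set α) (x : α) :
    PySem.Set.contains s x = false ↔ x ∉ s := by
  rw [← Bool.not_eq_true, not_iff_not]
  exact PySem.Set.contains_iff s x

lemma mem_pvTickA {bound : Int} {pts : PySem.Set (Int × Int)} {q : Int × Int} :
    q ∈ pvTickA bound pts ↔
      ((q ∈ pts ∧ (pvDetA pts q = 2 ∨ pvDetA pts q = 3)) ∨
        ((∃ p ∈ pts, q ∈ pvNeighA p) ∧ pvInBoundA bound q = true ∧ q ∉ pts ∧ pvDetA pts q = 3) ∨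
        (q = ((0 : Int), (0 : Int)) ∨ q = (0, bound - 1) ∨ q = (bound - 1, 0) ∨
          q = (bound - 1, bound - 1))) := by
  unfold pvTickA
  rw [mem_stuckAdd, inner_step_eq bound pts,
    mem_outer (fun p => pvDetA pts p ∈ ([2, 3] : List Int))
      (fun nb => pvInBoundA bound nb = true ∧
        (PySem.Set.contains pts nb = false ∧ pvDetA pts nb = 3)) pvNeighA pts PySem.Set.empty q]
  simp only [PySem.Set.empty, List.not_mem_nil, false_or, contains_false_iff,
    List.mem_cons, List.not_mem_nil, or_false]
  constructor
  · rintro (⟨p, hp, (⟨rfl, hS⟩ | ⟨hn, hP⟩)⟩ | hc)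
    · exact Or.inl ⟨hp, hS⟩
    · exact Or.inr (Or.inl ⟨⟨p, hp, hn⟩, hP⟩)
    · exact Or.inr (Or.inr hc)
  · rintro (⟨hq, hS⟩ | ⟨⟨p, hp, hn⟩, hP⟩ | hc)
    · exact Or.inl ⟨q, hq, Or.inl ⟨rfl, hS⟩⟩
    · exact Or.inl ⟨p, hp, Or.inr ⟨hn, hP⟩⟩
    · exact Or.inr hc

lemma pvTickA_nodup (bound : Int) (pts : PySem.Set (Int × Int)) : (pvTickA bound pts).Nodup := by
  unfold pvTickA
  apply nodup_stuckAdd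
  rw [inner_step_eq bound pts]
  exact nodup_outer _ _ _ _ _ List.nodup_nil

lemma pvNeighA_eq (p : Int × Int) :
    pvNeighA p = pvOffs.map (fun d => (p.1 + d.1, p.2 + d.2)) := rfl

lemma pvNeighA_nodup (p : Int × Int) : (pvNeighA p).Nodup := by
  rw [pvNeighA_eq]
  simp [pvOffs, Prod.ext_iff]

-- count of q in the flattened neighbour multiset = number of live cells adjacent to q

lemma count_flat (t : List (Int × Int)) (q : Int × Int) :
    (t.flatMap (fun p => pvOffs.map (fun d => (p.1 + d.1, p.2 + d.2)))).count q =
      t.countP (fun p => decide (q ∈ pvNeighA p)) := by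
  induction t with
  | nil => simp
  | cons p t ih =>
    rw [List.flatMap_cons, List.count_append, ih, List.countP_cons, ← pvNeighA_eq]
    by_cases hq : q ∈ pvNeighA p
    · rw [List.count_eq_one_of_mem (pvNeighA_nodup p) hq]
      simp [hq, Nat.add_comm]
    · rw [List.count_eq_zero_of_not_mem hq]
      simp [hq]

lemma mem_pvTickB {n : Int} {corners live : PySem.Set (Int × Int)} {q : Int × Int} :
    q ∈ pvTickB n corners live ↔
      ((∃ p ∈ live, q ∈ pvNeighA p) ∧
        (if q ∈ live then
            ((live.countP (fun p => decide (q ∈ pvNeighA p)) : Int) = 2 ∨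
              (live.countP (fun p => decide (q ∈ pvNeighA p)) : Int) = 3)
          else ((live.countP (fun p => decide (q ∈ pvNeighA p)) : Int) = 3 ∧
            0 ≤ q.1 ∧ q.1 < n ∧ 0 ≤ q.2 ∧ q.2 < n))) ∨ q ∈ corners := by
  unfold pvTickB
  rw [PySem.Set.mem_union, PySem.Set.mem_ofList, PySem.Dict.items_counter]
  simp only [List.mem_map, List.mem_filter]
  constructor
  · rintro (⟨pc, ⟨⟨k, hk, rfl⟩, hf⟩, rfl⟩ | hc)
    · left
      rw [PySem.Set.mem_ofList, List.mem_flatMap] at hk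
      obtain ⟨p, hp, hkp⟩ := hk
      rw [← pvNeighA_eq] at hkp
      refine ⟨⟨p, hp, hkp⟩, ?_⟩
      rw [count_flat] at hf
      by_cases hql : k ∈ live
      · rw [if_pos hql]
        rw [if_pos ((PySem.Set.contains_iff live k).mpr hql)] at hf
        simpa using hf
      · rw [if_neg hql]
        rw [if_neg (by rw [PySem.Set.contains_iff]; exact hql)] at hf
        simp only [Bool.and_eq_true, beq_iff_eq, decide_eq_true_eq] at hf
        exact ⟨hf.1.1.1.1, hf.1.1.1.2, hf.1.1.2, hf.1.2, hf.2⟩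
    · exact Or.inr hc
  · rintro (⟨⟨p, hp, hqp⟩, hcond⟩ | hc)
    · left
      have hqmem : q ∈ PySem.Set.ofList
          (live.flatMap (fun p => pvOffs.map (fun d => (p.1 + d.1, p.2 + d.2)))) := by
        rw [PySem.Set.mem_ofList, List.mem_flatMap]
        exact ⟨p, hp, by rw [← pvNeighA_eq]; exact hqp⟩
      refine ⟨(q, ((live.flatMap (fun p => pvOffs.map (fun d => (p.1 + d.1, p.2 + d.2)))).count q : Int)),
        ⟨⟨q, hqmem, rfl⟩, ?_⟩, rfl⟩
      rw [count_flat]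
      by_cases hql : q ∈ live
      · rw [if_pos ((PySem.Set.contains_iff live q).mpr hql)]
        rw [if_pos hql] at hcond
        simpa using hcond
      · rw [if_neg (by rw [PySem.Set.contains_iff]; exact hql)]
        rw [if_neg hql] at hcond
        simp only [Bool.and_eq_true, beq_iff_eq, decide_eq_true_eq]
        exact ⟨⟨⟨⟨hcond.1, hcond.2.1⟩, hcond.2.2.1⟩, hcond.2.2.2.1⟩, hcond.2.2.2.2⟩
    · exact Or.inr hc

lemma mem_pvNeighA {q p : Int × Int} :
    q ∈ pvNeighA p ↔
      (-1 ≤ q.1 - p.1 ∧ q.1 - p.1 ≤ 1 ∧ -1 ≤ q.2 - p.2 ∧ q.2 - p.2 ≤ 1 ∧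
        ¬(q.1 = p.1 ∧ q.2 = p.2)) := by
  rw [pvNeighA_eq]
  simp only [pvOffs, List.map_cons, List.map_nil, List.mem_cons, List.not_mem_nil, or_false,
    Prod.ext_iff]
  constructor
  · rintro (⟨h1, h2⟩ | ⟨h1, h2⟩ | ⟨h1, h2⟩ | ⟨h1, h2⟩ | ⟨h1, h2⟩ | ⟨h1, h2⟩ | ⟨h1, h2⟩ | ⟨h1, h2⟩) <;>
      omega
  · intro h; omega

lemma pvNeighA_symm {q p : Int × Int} : q ∈ pvNeighA p ↔ p ∈ pvNeighA q := by
  rw [mem_pvNeighA, mem_pvNeighA]; omega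

lemma countP_mem_comm {α : Type} [BEq α] [LawfulBEq α] (a b : List α)
    (ha : a.Nodup) (hb : b.Nodup) :
    a.countP (fun x => decide (x ∈ b)) = b.countP (fun x => decide (x ∈ a)) := by
  letI : DecidableEq α := fun x y => decidable_of_iff ((x == y) = true) (by simp)
  rw [List.countP_eq_length_filter, List.countP_eq_length_filter,
    ← List.toFinset_card_of_nodup (ha.filter _), ← List.toFinset_card_of_nodup (hb.filter _)]
  congr 1
  apply Finset.ext
  intro x
  simp [and_comm]

lemma pvDetA_eq_countP (pts : PySem.Set (Int × Int)) (p : Int × Int) :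
    pvDetA pts p = ((pvNeighA p).countP (fun r => decide (r ∈ pts)) : Int) := by
  unfold pvDetA
  rw [PySem.List.foldl_count_if (fun q => PySem.Set.contains pts q) (pvNeighA p) 0]
  norm_num

lemma det_eq (s t : PySem.Set (Int × Int)) (ht : t.Nodup)
    (hm : ∀ x, x ∈ s ↔ x ∈ t) (q : Int × Int) :
    pvDetA s q = (t.countP (fun p => decide (q ∈ pvNeighA p)) : Int) := by
  rw [pvDetA_eq_countP]
  congr 1
  calc (pvNeighA q).countP (fun r => decide (r ∈ s))
      = (pvNeighA q).countP (fun r => decide (r ∈ t)) :=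
        List.countP_congr (fun x _ => by simp [hm x])
    _ = t.countP (fun x => decide (x ∈ pvNeighA q)) :=
        countP_mem_comm (pvNeighA q) t (pvNeighA_nodup q) ht
    _ = t.countP (fun p => decide (q ∈ pvNeighA p)) :=
        List.countP_congr (fun x _ => by simp [pvNeighA_symm])

lemma tick_equiv (n : Int) (s t : PySem.Set (Int × Int)) (ht : t.Nodup)
    (hm : ∀ x, x ∈ s ↔ x ∈ t) (q : Int × Int) :
    (q ∈ pvTickA n s ↔
      q ∈ pvTickB n (PySem.Set.ofList [((0 : Int), (0 : Int)), (0, n - 1), (n - 1, 0), (n - 1, n - 1)]) t) := by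
  rw [mem_pvTickA, mem_pvTickB]
  have hcor : q ∈ PySem.Set.ofList [((0 : Int), (0 : Int)), (0, n - 1), (n - 1, 0), (n - 1, n - 1)] ↔
      (q = ((0 : Int), (0 : Int)) ∨ q = (0, n - 1) ∨ q = (n - 1, 0) ∨ q = (n - 1, n - 1)) := by
    simp [PySem.Set.mem_ofList]
  rw [hcor]
  have hE : (∃ p ∈ s, q ∈ pvNeighA p) ↔ (∃ p ∈ t, q ∈ pvNeighA p) := by
    constructor <;> rintro ⟨p, hp, h⟩
    · exact ⟨p, (hm p).mp hp, h⟩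
    · exact ⟨p, (hm p).mpr hp, h⟩
  have hpos : ((t.countP (fun p => decide (q ∈ pvNeighA p)) : Int) = 2 ∨
      (t.countP (fun p => decide (q ∈ pvNeighA p)) : Int) = 3) → (∃ p ∈ t, q ∈ pvNeighA p) := by
    intro h
    have hlt : 0 < t.countP (fun p => decide (q ∈ pvNeighA p)) := by
      rcases h with h | h <;> omega
    obtain ⟨p, hp, hpq⟩ := List.countP_pos_iff.mp hlt
    exact ⟨p, hp, by simpa using hpq⟩
  have hinb : pvInBoundA n q = true ↔ (0 ≤ q.1 ∧ q.1 < n ∧ 0 ≤ q.2 ∧ q.2 < n) := by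
    simp only [pvInBoundA, Bool.and_eq_true, decide_eq_true_eq, le_min_iff, max_lt_iff]
    omega
  rw [det_eq s t ht hm q, hinb]
  by_cases hq : q ∈ t
  · rw [if_pos hq]
    have hqs : q ∈ s := (hm q).mpr hq
    constructor
    · rintro (⟨_, h⟩ | ⟨_, _, hns, _⟩ | hc)
      · exact Or.inl ⟨hpos h, h⟩
      · exact absurd hqs hns
      · exact Or.inr hc
    · rintro (⟨hE', h⟩ | hc)
      · exact Or.inl ⟨hqs, h⟩
      · exact Or.inr (Or.inr hc)
  · rw [if_neg hq]
    have hqs : q ∉ s := fun h => hq ((hm q).mp h)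
    constructor
    · rintro (⟨h, _⟩ | ⟨hE1, hb, _, h3⟩ | hc)
      · exact absurd h hqs
      · exact Or.inl ⟨hE.mp hE1, h3, hb⟩
      · exact Or.inr hc
    · rintro (⟨hE', h3, hb⟩ | hc)
      · exact Or.inr (Or.inl ⟨hE.mpr hE', hb, hqs, h3⟩)
      · exact Or.inr (Or.inr hc)

lemma pvTickB_nodup (n : Int) (corners live : PySem.Set (Int × Int)) :
    (pvTickB n corners live).Nodup := by
  unfold pvTickB
  exact PySem.Set.nodup_union _ _ (PySem.Set.nodup_ofList _)

lemma loop_equiv (n : Int) (l : List Int) (s t : PySem.Set (Int × Int))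
    (hs : s.Nodup) (ht : t.Nodup) (hm : ∀ x, x ∈ s ↔ x ∈ t) :
    (l.foldl (fun s _ => pvTickA n s) s).Nodup ∧
    (l.foldl (fun live _ => pvTickB n
      (PySem.Set.ofList [((0 : Int), (0 : Int)), (0, n - 1), (n - 1, 0), (n - 1, n - 1)]) live) t).Nodup ∧
    (∀ q, q ∈ l.foldl (fun s _ => pvTickA n s) s ↔
      q ∈ l.foldl (fun live _ => pvTickB n
        (PySem.Set.ofList [((0 : Int), (0 : Int)), (0, n - 1), (n - 1, 0), (n - 1, n - 1)]) live) t) := by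
  induction l generalizing s t with
  | nil => exact ⟨hs, ht, hm⟩
  | cons x xs ih =>
    rw [List.foldl_cons, List.foldl_cons]
    exact ih _ _ (pvTickA_nodup n s) (pvTickB_nodup n _ t) (tick_equiv n s t ht hm)

lemma main_eq (inp : List String) (steps : Int) :
    main_part_2 inp steps = main_part_2_alt inp steps := by
  unfold main_part_2 main_part_2_alt
  simp only [PySem.List.foldl_append_if, PySem.List.foldl_append_eq_flatMap, List.nil_append]
  set n : Int := (inp.length : Int) with hn
  set grid := (PySem.List.enumerate inp).flatMap (fun yr =>
    ((PySem.List.enumerate (PySem.Str.strip yr.2).toList).filter (fun xc => xc.2 == '#')).map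
      (fun xc => (xc.1, yr.1))) with hgrid
  have hs : (PySem.Set.update (pvStuckAdd n PySem.Set.empty) grid).Nodup :=
    PySem.Set.nodup_update _ _ (nodup_stuckAdd n _ List.nodup_nil)
  have ht : (PySem.Set.union (PySem.Set.ofList [((0 : Int), (0 : Int)), (0, n - 1), (n - 1, 0), (n - 1, n - 1)])
      (PySem.Set.ofList grid)).Nodup :=
    PySem.Set.nodup_union _ _ (PySem.Set.nodup_ofList _)
  have hm : ∀ x, x ∈ PySem.Set.update (pvStuckAdd n PySem.Set.empty) grid ↔
      x ∈ PySem.Set.union (PySem.Set.ofList [((0 : Int), (0 : Int)), (0, n - 1), (n - 1, 0), (n - 1, n - 1)])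
        (PySem.Set.ofList grid) := by
    intro x
    rw [PySem.Set.mem_update, PySem.Set.mem_union, mem_stuckAdd, PySem.Set.mem_ofList,
      PySem.Set.mem_ofList]
    simp [PySem.Set.empty]
  obtain ⟨ha, hb, hq⟩ := loop_equiv n (PySem.List.pyRange 0 steps 1) _ _ hs ht hm
  have : (List.foldl (fun s _ => pvTickA n s) (PySem.Set.update (pvStuckAdd n PySem.Set.empty) grid)
      (PySem.List.pyRange 0 steps 1)).Perm
      (List.foldl (fun live _ => pvTickB n
        (PySem.Set.ofList [((0 : Int), (0 : Int)), (0, n - 1), (n - 1, 0), (n - 1, n - 1)]) live)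
        (PySem.Set.union (PySem.Set.ofList [((0 : Int), (0 : Int)), (0, n - 1), (n - 1, 0), (n - 1, n - 1)])
          (PySem.Set.ofList grid)) (PySem.List.pyRange 0 steps 1)) :=
    (List.perm_ext_iff_of_nodup ha hb).mpr hq
  exact_mod_cast this.length_eq

-- ===== VERDICT (by name: the statement is the Claim_ definition above) =====
theorem main_part_2_spec : Claim_equal_main_part_2 := by
  intro inp steps _
  unfold Spec_main_part_2
  exact main_eq inp steps
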